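-- pv_equiv track=rewrite | github.com/ElHadheqMind/Vibindu-live | grafcet-agents/agents/simulation_agent.py | _find_reachable_steps
-- ===== SOURCE A (Python) =====
-- from typing import List, Dict, Any, Optional, Set, Tuple
--
-- def _find_reachable_steps(
--
--     initial_steps: List[Dict],
--     connections_from: Dict[str, List[str]],
--     steps: List[Dict],
--     transitions: List[Dict]
-- ) -> Set[str]:
--     """BFS to find all steps reachable from initial steps."""
--     reachable: Set[str] = set()
--     step_ids = {s.get("id") for s in steps}
--     transition_ids = {t.get("id") for t in transitions}
--
--     queue = [s.get("id") for s in initial_steps]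
--     visited: Set[str] = set()
--
--     while queue:
--         current = queue.pop(0)
--         if current in visited:
--             continue
--         visited.add(current)
--
--         if current in step_ids:
--             reachable.add(current)
--
--         # Follow connections
--         for target in connections_from.get(current, []):
--             if target not in visited:
--                 queue.append(target)
--
--     return reachable
-- ===== SOURCE B (Python) =====
-- def _find_reachable_steps(
--     initial_steps,
--     connections_from,
--     steps,
--     transitions
-- ):
--     """Datalog-style saturation: sweep the whole connection table repeatedly,
--     adding targets of already-reached sources, until a sweep changes nothing;
--     no queue/frontier is maintained at all."""
--     step_ids = {s.get("id") for s in steps}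
--     transition_ids = {t.get("id") for t in transitions}
--
--     visited = {s.get("id") for s in initial_steps}
--     changed = True
--     while changed:
--         changed = False
--         for src, targets in connections_from.items():
--             if src in visited:
--                 for target in targets:
--                     if target not in visited:
--                         visited.add(target)
--                         changed = True
--
--     return {n for n in visited if n in step_ids}
-- ===== Notes on version B (the rewrite author's own statement) =====
-- stated objective: alternative
-- what changed: Replaced the BFS worklist (FIFO queue with pop(0) and a visited check at pop time) by Datalog-style fixed-point saturation: no queue at all, the connection table is swept repeatedly, adding targets of already-reached sources, until a full sweep changes nothing; the reachable set is then visited intersected with step_ids.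
-- outside the precondition, e.g. on _find_reachable_steps([{}], {}, [{}], []): A returns {None}, B returns {None}
import Mathlib
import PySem

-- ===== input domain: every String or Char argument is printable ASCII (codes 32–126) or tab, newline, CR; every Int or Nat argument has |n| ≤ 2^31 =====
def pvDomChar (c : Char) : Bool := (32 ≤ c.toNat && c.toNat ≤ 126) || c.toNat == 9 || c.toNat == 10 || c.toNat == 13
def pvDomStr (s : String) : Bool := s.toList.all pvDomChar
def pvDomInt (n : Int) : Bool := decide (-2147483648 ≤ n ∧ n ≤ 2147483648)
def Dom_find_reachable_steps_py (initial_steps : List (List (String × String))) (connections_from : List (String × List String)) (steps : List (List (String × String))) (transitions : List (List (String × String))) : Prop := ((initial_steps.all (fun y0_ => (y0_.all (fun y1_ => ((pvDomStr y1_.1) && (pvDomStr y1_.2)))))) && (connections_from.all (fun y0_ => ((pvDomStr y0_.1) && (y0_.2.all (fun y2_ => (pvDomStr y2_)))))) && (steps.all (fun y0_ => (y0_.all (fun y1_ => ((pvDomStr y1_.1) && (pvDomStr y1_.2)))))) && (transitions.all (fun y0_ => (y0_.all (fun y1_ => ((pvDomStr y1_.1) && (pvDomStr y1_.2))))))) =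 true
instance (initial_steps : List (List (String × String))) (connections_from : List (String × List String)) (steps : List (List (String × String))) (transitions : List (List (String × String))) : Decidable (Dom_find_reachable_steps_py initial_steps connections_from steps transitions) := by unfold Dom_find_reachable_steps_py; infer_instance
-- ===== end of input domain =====

-- B replaces A's BFS worklist (FIFO queue, pop(0), visited check at pop time) by Datalog-style
-- fixed-point saturation over the connection table; same reachable SET. Both Pythons return a
-- set, whose iteration order is not modelled (PYSEM.md): both ports return the canonical
-- strictly-sorted list of the returned set's elements — exact as a set.

-- ===== PORT A =====
-- s.get("id")
def pvGetId (s : List (String × String)) : Option String :=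
  PySem.Dict.get? (PySem.Dict.mk s) "id"

-- connections_from.get(current, []) for a queue element (None has no connections: keys are str)
def pvTgt (conn : List (String × List String)) (cur : Option String) : List (Option String) :=
  match cur with
  | some c => (PySem.Dict.getD (PySem.Dict.mk conn) c []).map some
  | none => []

-- all values that can ever be discovered through connections_from
def pvAllT (conn : List (String × List String)) : List (Option String) :=
  conn.flatMap (fun p => p.2.map some)

lemma pvTgt_subset (conn : List (String × List String)) (cur : Option String) :
    ∀ x ∈ pvTgt conn cur, x ∈ pvAllT conn := by
  intro x hx
  cases cur with
  | none => simp [pvTgt] at hx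
  | some c =>
    simp only [pvTgt, List.mem_map] at hx
    obtain ⟨t, ht, rfl⟩ := hx
    simp only [pvAllT, List.mem_flatMap, List.mem_map]
    induction conn with
    | nil => simp [PySem.Dict.getD, PySem.Dict.get?] at ht
    | cons p rest ih =>
      rw [PySem.Dict.getD_eq_get?_getD, PySem.Dict.get?_mk_cons] at ht
      by_cases h : (p.1 == c) = true
      · rw [if_pos h] at ht
        exact ⟨p, List.mem_cons_self .., t, by simpa using ht, rfl⟩
      · rw [if_neg h, ← PySem.Dict.getD_eq_get?_getD] at ht
        obtain ⟨q, hq, hw⟩ := ih ht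
        exact ⟨q, List.mem_cons_of_mem _ hq, hw⟩

-- termination helpers: strict decrease of the unvisited-count component of the measures
lemma pvFilterMono {α : Type} (p p' : α → Bool) (hsub : ∀ y, p' y = true → p y = true)
    (m : List α) : (m.filter p').length ≤ (m.filter p).length := by
  rw [← List.countP_eq_length_filter, ← List.countP_eq_length_filter]
  exact List.countP_mono_left (fun a _ ha => hsub a ha)

lemma pvFilterLt {α : Type} (p p' : α → Bool) (hsub : ∀ y, p' y = true → p y = true)
    (l : List α) (x : α) (hx : x ∈ l) (hpx : p x = true) (hpx' : p' x = false) :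
    (l.filter p').length < (l.filter p).length := by
  induction l with
  | nil => simp at hx
  | cons a l ih =>
    rcases List.mem_cons.1 hx with rfl | hxl
    · simp only [List.filter_cons, hpx, hpx', if_true, Bool.false_eq_true, if_false]
      exact Nat.lt_succ_of_le (pvFilterMono p p' hsub l)
    · by_cases ha : p' a = true
      · have ha2 := hsub a ha
        simp only [List.filter_cons, ha, ha2, if_true, List.length_cons]
        exact Nat.succ_lt_succ (ih hxl)
      · have ha' : p' a = false := by simpa using ha
        by_cases hb : p a = true
        · simp only [List.filter_cons, ha', hb, if_true, Bool.false_eq_true, if_false,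
            List.length_cons]
          exact Nat.lt_succ_of_lt (ih hxl)
        · have hb' : p a = false := by simpa using hb
          simp only [List.filter_cons, ha', hb', Bool.false_eq_true, if_false]
          exact ih hxl

lemma pvMeasureLt (U v w' : List (Option String)) (cur : Option String)
    (hU : cur ∈ U) (hv : cur ∉ v) (hw : cur ∈ w') (hsub : ∀ y ∈ v, y ∈ w') :
    ((PySem.List.dedup U).filter (fun y => !PySem.Set.contains w' y)).length <
      ((PySem.List.dedup U).filter (fun y => !PySem.Set.contains v y)).length := by
  refine pvFilterLt (fun y => !PySem.Set.contains v y) (fun y => !PySem.Set.contains w' y)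
    ?_ _ cur ((PySem.List.mem_dedup U cur).2 hU) (by simpa using hv) (by simpa using hw)
  intro y hy
  simp at hy ⊢
  exact fun hm => hy (hsub y hm)

-- the while-queue loop of A, carried with its queue-membership invariant for termination
def pvAuxA (sid : PySem.Set (Option String)) (conn : List (String × List String))
    (U : List (Option String)) (hU : ∀ x ∈ pvAllT conn, x ∈ U)
    (q v r : List (Option String)) (hq : ∀ x ∈ q, x ∈ U) : List (Option String) :=
  match q with
  | [] => r
  | cur :: rest =>
    if hv : PySem.Set.contains v cur = true then
      pvAuxA sid conn U hU rest v r (fun x hx => hq x (List.mem_cons_of_mem _ hx))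
    else
      pvAuxA sid conn U hU
        (rest ++ (pvTgt conn cur).filter
          (fun t => !PySem.Set.contains (PySem.Set.add v cur) t))
        (PySem.Set.add v cur)
        (if PySem.Set.contains sid cur then PySem.Set.add r cur else r)
        (fun x hx => by
          rcases List.mem_append.1 hx with h | h
          · exact hq x (List.mem_cons_of_mem _ h)
          · exact hU x (pvTgt_subset conn cur x (List.mem_of_mem_filter h)))
  termination_by
    (((PySem.List.dedup U).filter (fun y => !PySem.Set.contains v y)).length, q.length)
  decreasing_by
    · exact Prod.Lex.right _ (by simp)
    · exact Prod.Lex.left _ _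
        (pvMeasureLt U v (PySem.Set.add v cur) cur
          (hq cur (List.mem_cons_self ..))
          (fun hmem => hv ((PySem.Set.contains_iff v cur).2 hmem))
          ((PySem.Set.mem_add v cur cur).2 (Or.inr rfl))
          (fun y hy => (PySem.Set.mem_add v cur y).2 (Or.inl hy)))

def find_reachable_steps_py (initial_steps : List (List (String × String))) (connections_from : List (String × List String)) (steps : List (List (String × String))) (transitions : List (List (String × String))) : List String :=
  let step_ids : PySem.Set (Option String) := PySem.Set.ofList (steps.map pvGetId)
  let _transition_ids : PySem.Set (Option String) := PySem.Set.ofList (transitions.map pvGetId)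
  let q0 := initial_steps.map pvGetId
  let reachable := pvAuxA step_ids connections_from (q0 ++ pvAllT connections_from)
      (fun x hx => List.mem_append.2 (Or.inr hx))
      q0 [] []
      (fun x hx => List.mem_append.2 (Or.inl hx))
  PySem.List.sorted (reachable.filterMap id) (fun s => s)

-- ===== PORT B =====
-- the inner 'for target in targets' loop of B's sweep: add unseen targets, flag the change
def pvInnerB (st : List (Option String) × Bool) (ts : List String) :
    List (Option String) × Bool :=
  ts.foldl
    (fun p t => if PySem.Set.contains p.1 (some t) then p else (PySem.Set.add p.1 (some t), true))
    st

-- one full sweep 'for src, targets in connections_from.items(): …' of B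
def pvPassB (conn : List (String × List String)) (st : List (Option String) × Bool) :
    List (Option String) × Bool :=
  (PySem.Dict.mk conn).items.foldl
    (fun p e => if PySem.Set.contains p.1 (some e.1) then pvInnerB p e.2 else p) st

-- shape of the inner loop: visited grows by the unseen targets, flag records growth
lemma pvInnerB_shape (ts : List String) :
    ∀ (v : List (Option String)) (b : Bool), ∃ d,
      pvInnerB (v, b) ts = (v ++ d, b || !d.isEmpty) ∧
      (∀ x ∈ d, (∃ t ∈ ts, x = some t) ∧ x ∉ v) ∧
      (d = [] → ∀ t ∈ ts, some t ∈ v) := by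
  induction ts with
  | nil => intro v b; exact ⟨[], by simp [pvInnerB], by simp, by simp⟩
  | cons t ts ih =>
    intro v b
    by_cases h : PySem.Set.contains v (some t) = true
    · obtain ⟨d, hd, hm, hc⟩ := ih v b
      have hmem : some t ∈ v := (PySem.Set.contains_iff v (some t)).1 h
      refine ⟨d, ?_, ?_, ?_⟩
      · have : pvInnerB (v, b) (t :: ts) = pvInnerB (v, b) ts := by simp [pvInnerB, hmem]
        rw [this, hd]
      · intro x hx
        obtain ⟨⟨t', ht', rfl⟩, hnv⟩ := hm x hx
        exact ⟨⟨t', List.mem_cons_of_mem _ ht', rfl⟩, hnv⟩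
      · intro h0 t' ht'
        rcases List.mem_cons.1 ht' with rfl | ht'
        · exact (PySem.Set.contains_iff v (some t')).1 h
        · exact hc h0 t' ht'
    · have hnm : some t ∉ v := fun hm => h ((PySem.Set.contains_iff v (some t)).2 hm)
      obtain ⟨d, hd, hm, _⟩ := ih (v ++ [some t]) true
      refine ⟨some t :: d, ?_, ?_, by simp⟩
      · have : pvInnerB (v, b) (t :: ts) = pvInnerB (v ++ [some t], true) ts := by
          simp [pvInnerB, hnm, PySem.Set.add_of_not_mem hnm]
        rw [this, hd]
        simp
      · intro x hx
        rcases List.mem_cons.1 hx with rfl | hx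
        · exact ⟨⟨t, List.mem_cons_self .., rfl⟩, hnm⟩
        · obtain ⟨⟨t', ht', rfl⟩, hnv⟩ := hm x hx
          exact ⟨⟨t', List.mem_cons_of_mem _ ht', rfl⟩,
            fun hv => hnv (List.mem_append.2 (Or.inl hv))⟩

-- shape of a full sweep over a suffix l of the connection list
lemma pvPassB_shape (conn : List (String × List String)) :
    ∀ (l : List (String × List String)) (hl : ∀ p ∈ l, p ∈ conn)
      (v : List (Option String)) (b : Bool), ∃ d,
      l.foldl (fun p e => if PySem.Set.contains p.1 (some e.1) then pvInnerB p e.2 else p) (v, b)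
        = (v ++ d, b || !d.isEmpty) ∧
      (∀ x ∈ d, x ∈ pvAllT conn ∧ x ∉ v) ∧
      (d = [] → ∀ p ∈ l, PySem.Set.contains v (some p.1) = true → ∀ t ∈ p.2, some t ∈ v) := by
  intro l
  induction l with
  | nil => intro _ v b; exact ⟨[], by simp, by simp, by simp⟩
  | cons p l ih =>
    intro hl v b
    by_cases h : PySem.Set.contains v (some p.1) = true
    · obtain ⟨d1, hd1, hm1, hc1⟩ := pvInnerB_shape p.2 v b
      obtain ⟨d2, hd2, hm2, hc2⟩ := ih (fun q hq => hl q (List.mem_cons_of_mem _ hq))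
        (v ++ d1) (b || !d1.isEmpty)
      refine ⟨d1 ++ d2, ?_, ?_, ?_⟩
      · rw [List.foldl_cons, if_pos h, hd1, hd2]
        cases d1 <;> cases d2 <;> simp [List.append_assoc]
      · intro x hx
        rcases List.mem_append.1 hx with hx | hx
        · obtain ⟨⟨t, ht, rfl⟩, hnv⟩ := hm1 x hx
          exact ⟨List.mem_flatMap.2 ⟨p, hl p (List.mem_cons_self ..),
            List.mem_map.2 ⟨t, ht, rfl⟩⟩, hnv⟩
        · obtain ⟨h1, h2⟩ := hm2 x hx
          exact ⟨h1, fun hv => h2 (List.mem_append.2 (Or.inl hv))⟩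
      · intro h0 q hq hcq t ht
        have hd1nil : d1 = [] := by
          cases d1 with
          | nil => rfl
          | cons a d1 => exact absurd h0 (by simp)
        have hd2nil : d2 = [] := by
          cases d2 with
          | nil => rfl
          | cons a d2 => exact absurd h0 (by simp [hd1nil])
        rcases List.mem_cons.1 hq with rfl | hq
        · exact hc1 hd1nil t ht
        · have := hc2 hd2nil q hq (by simpa [hd1nil] using hcq) t ht
          simpa [hd1nil] using this
    · obtain ⟨d, hd, hm, hc⟩ := ih (fun q hq => hl q (List.mem_cons_of_mem _ hq)) v b
      refine ⟨d, by rw [List.foldl_cons, if_neg h]; exact hd, hm, ?_⟩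
      intro h0 q hq hcq t ht
      rcases List.mem_cons.1 hq with rfl | hq
      · exact absurd hcq h
      · exact hc h0 q hq hcq t ht

-- the 'while changed' saturation loop of B
def pvLoopB (conn : List (String × List String)) (v : List (Option String)) :
    List (Option String) :=
  let st := pvPassB conn (v, false)
  if h : st.2 = true then pvLoopB conn st.1 else st.1
  termination_by
    ((PySem.List.dedup (pvAllT conn)).filter (fun y => !PySem.Set.contains v y)).length
  decreasing_by
    obtain ⟨d, hd, hm, _⟩ := pvPassB_shape conn conn (fun _ hp => hp) v false
    simp only [Bool.false_or] at hd
    have hd' : st = (v ++ d, !d.isEmpty) := hd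
    cases d with
    | nil => rw [hd'] at h; simp at h
    | cons t d =>
      have h1 : st.1 = v ++ t :: d := by rw [hd']
      rw [h1]
      exact pvMeasureLt (pvAllT conn) v (v ++ t :: d) t
        (hm t (List.mem_cons_self ..)).1
        (hm t (List.mem_cons_self ..)).2
        (List.mem_append.2 (Or.inr (List.mem_cons_self ..)))
        (fun y hy => List.mem_append.2 (Or.inl hy))

def find_reachable_steps_py_alt (initial_steps : List (List (String × String))) (connections_from : List (String × List String)) (steps : List (List (String × String))) (transitions : List (List (String × String))) : List String :=
  let step_ids : PySem.Set (Option String) := PySem.Set.ofList (steps.map pvGetId)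
  let _transition_ids : PySem.Set (Option String) := PySem.Set.ofList (transitions.map pvGetId)
  let visited := pvLoopB connections_from (PySem.Set.ofList (initial_steps.map pvGetId))
  let reachable : PySem.Set (Option String) :=
    PySem.Set.ofList (visited.filter (fun n => PySem.Set.contains step_ids n))
  PySem.List.sorted (reachable.filterMap id) (fun s => s)

-- ===== PRECONDITION & SPEC =====
-- Pre_ excludes (a) assoc lists with duplicate keys in connections_from — a Python dict cannot
-- hold them, and on such lists first-match lookup (A) and pair iteration (B) are two equally
-- accidental readings of the 'dict' — and (b) inputs where both some initial_steps dict and some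
-- steps dict lack the key "id": exactly there A's returned set contains None, which is not a str
-- (declared return type Set[str]) and not representable as a List String; B returns the same set.
def Pre_find_reachable_steps_py (initial_steps : List (List (String × String))) (connections_from : List (String × List String)) (steps : List (List (String × String))) (transitions : List (List (String × String))) : Prop :=
  (connections_from.map Prod.fst).Nodup ∧
  ((∀ s ∈ initial_steps, (pvGetId s).isSome = true) ∨ (∀ t ∈ steps, (pvGetId t).isSome = true))
instance (initial_steps : List (List (String × String))) (connections_from : List (String × List String)) (steps : List (List (String × String))) (transitions : List (List (String × String))) : Decidable (Pre_find_reachable_steps_py initial_steps connections_from steps transitions) := by unfold Pre_find_reachable_steps_py; infer_instance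

def pvWitness_find_reachable_steps_py : (List (List (String × String))) × (List (String × List String)) × (List (List (String × String))) × (List (List (String × String))) :=
  ([[("id", "s1")]], [("s1", ["s2"]), ("s2", ["s1"])], [[("id", "s1")], [("id", "s2")]], [])

def Spec_find_reachable_steps_py (initial_steps : List (List (String × String))) (connections_from : List (String × List String)) (steps : List (List (String × String))) (transitions : List (List (String × String))) (out : List String) : Prop := out = find_reachable_steps_py_alt initial_steps connections_from steps transitions
instance (initial_steps : List (List (String × String))) (connections_from : List (String × List String)) (steps : List (List (String × String))) (transitions : List (List (String × String))) (out : List String) : Decidable (Spec_find_reachable_steps_py initial_steps connections_from steps transitions out) := by unfold Spec_find_reachable_steps_py; infer_instance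

-- ===== CLAIM (what is proved, stated in full; the proofs are below) =====
def Claim_equal_find_reachable_steps_py : Prop := ∀ (initial_steps : List (List (String × String))) (connections_from : List (String × List String)) (steps : List (List (String × String))) (transitions : List (List (String × String))), Dom_find_reachable_steps_py initial_steps connections_from steps transitions → Pre_find_reachable_steps_py initial_steps connections_from steps transitions → Spec_find_reachable_steps_py initial_steps connections_from steps transitions (find_reachable_steps_py initial_steps connections_from steps transitions)

-- ===== LEMMAS AND PROOFS =====

-- the edge relation both programs follow, and reachability from a start list
def pvEdge (conn : List (String × List String)) (x y : Option String) : Prop :=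
  y ∈ pvTgt conn x

def pvReach (conn : List (String × List String)) (init : List (Option String))
    (x : Option String) : Prop :=
  ∃ s ∈ init, Relation.ReflTransGen (pvEdge conn) s x

-- an edge-closed set absorbs reflexive-transitive chains from its members
lemma pvRtgMem (conn : List (String × List String)) (v : List (Option String))
    (hcl : ∀ x ∈ v, ∀ y ∈ pvTgt conn x, y ∈ v) {s x : Option String}
    (h : Relation.ReflTransGen (pvEdge conn) s x) (hs : s ∈ v) : x ∈ v := by
  induction h with
  | refl => exact hs
  | tail _ h2 ih => exact hcl _ ih _ h2

-- membership characterisation of A's worklist loop, by its recursion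
lemma pvAuxA_mem (sid : PySem.Set (Option String)) (conn : List (String × List String))
    (U : List (Option String)) (hU : ∀ x ∈ pvAllT conn, x ∈ U)
    (init : List (Option String)) :
    ∀ (q v r : List (Option String)) (hq : ∀ x ∈ q, x ∈ U),
      (∀ x ∈ q, pvReach conn init x) →
      (∀ x ∈ v, pvReach conn init x) →
      (∀ x, x ∈ r ↔ x ∈ v ∧ PySem.Set.contains sid x = true) →
      (∀ x ∈ v, ∀ y ∈ pvTgt conn x, y ∈ v ∨ y ∈ q) →
      (∀ s ∈ init, s ∈ v ∨ s ∈ q) →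
      ∀ x, x ∈ pvAuxA sid conn U hU q v r hq ↔
        (pvReach conn init x ∧ PySem.Set.contains sid x = true) := by
  intro q v r hq
  induction q, v, r, hq using pvAuxA.induct sid conn U hU with
  | case1 v r hq =>
    intro _ hsv hr hcl hini x
    rw [pvAuxA]
    constructor
    · intro hx
      obtain ⟨hxv, hxs⟩ := (hr x).1 hx
      exact ⟨hsv x hxv, hxs⟩
    · rintro ⟨⟨s, hs, hrtg⟩, hxs⟩
      have hsv' : s ∈ v := by
        rcases hini s hs with h | h
        · exact h
        · simp at h
      have hxv : x ∈ v := pvRtgMem conn v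
        (fun a ha y hy => by
          rcases hcl a ha y hy with h | h
          · exact h
          · simp at h) hrtg hsv'
      exact (hr x).2 ⟨hxv, hxs⟩
  | case2 v r cur rest hq hv hm ih =>
    intro hsq hsv hr hcl hini x
    rw [pvAuxA, dif_pos hv]
    refine ih (fun a ha => hsq a (List.mem_cons_of_mem _ ha)) hsv hr ?_ ?_ x
    · intro a ha y hy
      rcases hcl a ha y hy with h | h
      · exact Or.inl h
      · rcases List.mem_cons.1 h with rfl | h
        · exact Or.inl ((PySem.Set.contains_iff v y).1 hv)
        · exact Or.inr h
    · intro s hs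
      rcases hini s hs with h | h
      · exact Or.inl h
      · rcases List.mem_cons.1 h with rfl | h
        · exact Or.inl ((PySem.Set.contains_iff v s).1 hv)
        · exact Or.inr h
  | case3 v r cur rest hq hv hm ih =>
    intro hsq hsv hr hcl hini x
    have hcurm : cur ∉ v := fun h => hv ((PySem.Set.contains_iff v cur).2 h)
    have hcurR : pvReach conn init cur := hsq cur (List.mem_cons_self ..)
    rw [pvAuxA, dif_neg hv]
    refine ih ?_ ?_ ?_ ?_ ?_ x
    · intro a ha
      rcases List.mem_append.1 ha with h | h
      · exact hsq a (List.mem_cons_of_mem _ h)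
      · obtain ⟨s, hs, hrtg⟩ := hcurR
        exact ⟨s, hs, hrtg.tail (List.mem_of_mem_filter h)⟩
    · intro a ha
      rcases (PySem.Set.mem_add v cur a).1 ha with h | heq
      · exact hsv a h
      · exact heq ▸ hcurR
    · intro a
      by_cases hsid : PySem.Set.contains sid cur = true
      · rw [dif_pos hsid]
        constructor
        · intro h
          rcases (PySem.Set.mem_add r cur a).1 h with h | heq
          · obtain ⟨h1, h2⟩ := (hr a).1 h
            exact ⟨(PySem.Set.mem_add v cur a).2 (Or.inl h1), h2⟩
          · exact ⟨(PySem.Set.mem_add v cur a).2 (Or.inr heq), heq ▸ hsid⟩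
        · rintro ⟨h1, h2⟩
          rcases (PySem.Set.mem_add v cur a).1 h1 with h | heq
          · exact (PySem.Set.mem_add r cur a).2 (Or.inl ((hr a).2 ⟨h, h2⟩))
          · exact (PySem.Set.mem_add r cur a).2 (Or.inr heq)
      · rw [dif_neg hsid]
        constructor
        · intro h
          obtain ⟨h1, h2⟩ := (hr a).1 h
          exact ⟨(PySem.Set.mem_add v cur a).2 (Or.inl h1), h2⟩
        · rintro ⟨h1, h2⟩
          rcases (PySem.Set.mem_add v cur a).1 h1 with h | heq
          · exact (hr a).2 ⟨h, h2⟩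
          · exact absurd (heq ▸ h2) hsid
    · intro a ha y hy
      rcases (PySem.Set.mem_add v cur a).1 ha with h | heq
      · rcases hcl a h y hy with h' | h'
        · exact Or.inl ((PySem.Set.mem_add v cur y).2 (Or.inl h'))
        · rcases List.mem_cons.1 h' with heq' | h'
          · exact Or.inl ((PySem.Set.mem_add v cur y).2 (Or.inr heq'))
          · exact Or.inr (List.mem_append.2 (Or.inl h'))
      · rw [heq] at hy
        by_cases hyv : PySem.Set.contains (PySem.Set.add v cur) y = true
        · exact Or.inl ((PySem.Set.contains_iff _ y).1 hyv)
        · exact Or.inr (List.mem_append.2 (Or.inr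
            (List.mem_filter.2 ⟨hy, by simpa using hyv⟩)))
    · intro s hs
      rcases hini s hs with h | h
      · exact Or.inl ((PySem.Set.mem_add v cur s).2 (Or.inl h))
      · rcases List.mem_cons.1 h with heq | h
        · exact Or.inl ((PySem.Set.mem_add v cur s).2 (Or.inr heq))
        · exact Or.inr (List.mem_append.2 (Or.inl h))

-- A's reachable list stays duplicate-free
lemma pvAuxA_nodup (sid : PySem.Set (Option String)) (conn : List (String × List String))
    (U : List (Option String)) (hU : ∀ x ∈ pvAllT conn, x ∈ U) :
    ∀ (q v r : List (Option String)) (hq : ∀ x ∈ q, x ∈ U),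
      r.Nodup → (pvAuxA sid conn U hU q v r hq).Nodup := by
  intro q v r hq
  induction q, v, r, hq using pvAuxA.induct sid conn U hU with
  | case1 v r hq => intro h; rw [pvAuxA]; exact h
  | case2 v r cur rest hq hv hm ih => intro h; rw [pvAuxA, dif_pos hv]; exact ih h
  | case3 v r cur rest hq hv hm ih =>
    intro h
    rw [pvAuxA, dif_neg hv]
    refine ih ?_
    by_cases hsid : PySem.Set.contains sid cur = true
    · rw [dif_pos hsid]; exact PySem.Set.nodup_add r cur h
    · rw [dif_neg hsid]; exact h

-- a sweep of B only adds values reachable (under any edge-closed predicate) from its visited set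
lemma pvInnerB_sound (P : Option String → Prop) (ts : List String)
    (hts : ∀ t ∈ ts, P (some t)) :
    ∀ (v : List (Option String)) (b : Bool), (∀ x ∈ v, P x) →
      ∀ x ∈ (pvInnerB (v, b) ts).1, P x := by
  induction ts with
  | nil => intro v b hv; simpa [pvInnerB] using hv
  | cons t ts ih =>
    intro v b hv
    by_cases h : some t ∈ v
    · have : pvInnerB (v, b) (t :: ts) = pvInnerB (v, b) ts := by simp [pvInnerB, h]
      rw [this]
      exact ih (fun a ha => hts a (List.mem_cons_of_mem _ ha)) v b hv
    · have : pvInnerB (v, b) (t :: ts) = pvInnerB (PySem.Set.add v (some t), true) ts := by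
        simp [pvInnerB, h]
      rw [this]
      refine ih (fun a ha => hts a (List.mem_cons_of_mem _ ha)) _ true ?_
      intro x hx
      rcases (PySem.Set.mem_add v (some t) x).1 hx with hx | rfl
      · exact hv x hx
      · exact hts t (List.mem_cons_self ..)

lemma pvPassB_sound (conn : List (String × List String)) (P : Option String → Prop)
    (hcl : ∀ x y, P x → y ∈ pvTgt conn x → P y) :
    ∀ (l : List (String × List String))
      (hl : ∀ p ∈ l, (PySem.Dict.mk conn).get? p.1 = some p.2)
      (v : List (Option String)) (b : Bool), (∀ x ∈ v, P x) →
      ∀ x ∈ (l.foldl (fun p e => if PySem.Set.contains p.1 (some e.1) then pvInnerB p e.2 else p)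
        (v, b)).1, P x := by
  intro l
  induction l with
  | nil => intro _ v b hv; simpa using hv
  | cons p l ih =>
    intro hl v b hv
    rw [List.foldl_cons]
    by_cases h : PySem.Set.contains v (some p.1) = true
    · rw [if_pos h]
      have hsrc : P (some p.1) := hv _ ((PySem.Set.contains_iff v (some p.1)).1 h)
      have hts : ∀ t ∈ p.2, P (some t) := by
        intro t ht
        refine hcl (some p.1) (some t) hsrc ?_
        simp only [pvTgt, PySem.Dict.getD_eq_get?_getD, hl p (List.mem_cons_self ..)]
        exact List.mem_map.2 ⟨t, ht, rfl⟩
      have hv' := pvInnerB_sound P p.2 hts v b hv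
      have hpair : pvInnerB (v, b) p.2 = ((pvInnerB (v, b) p.2).1, (pvInnerB (v, b) p.2).2) := rfl
      rw [hpair]
      exact ih (fun q hq => hl q (List.mem_cons_of_mem _ hq)) _ _ hv'
    · rw [if_neg h]
      exact ih (fun q hq => hl q (List.mem_cons_of_mem _ hq)) v b hv

-- B's saturation loop computes exactly the nodes reachable from its seed set
lemma pvLoopB_mem (conn : List (String × List String))
    (hnd : (conn.map Prod.fst).Nodup) :
    ∀ (v : List (Option String)) (x : Option String),
      x ∈ pvLoopB conn v ↔ ∃ s ∈ v, Relation.ReflTransGen (pvEdge conn) s x := by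
  have hl : ∀ p ∈ conn, (PySem.Dict.mk conn).get? p.1 = some p.2 := fun p hp =>
    PySem.Dict.get?_of_mem_items (PySem.Dict.mk conn) hp (by simpa using hnd)
  intro v
  induction v using pvLoopB.induct conn with
  | case1 v st hst ih =>
    intro x
    have hst' : (pvPassB conn (v, false)).2 = true := hst
    have e1 : pvLoopB conn v = pvLoopB conn (pvPassB conn (v, false)).1 := by
      rw [pvLoopB.eq_def]
      simp only [hst', dite_true]
    rw [e1, ih x]
    obtain ⟨d, hd, hm, _⟩ := pvPassB_shape conn conn (fun _ hp => hp) v false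
    simp only [Bool.false_or] at hd
    have h1 : (pvPassB conn (v, false)).1 = v ++ d := by
      rw [show pvPassB conn (v, false) = (v ++ d, !d.isEmpty) from hd]
    rw [h1]
    constructor
    · rintro ⟨s, hs, hrtg⟩
      have hsnd := pvPassB_sound conn
        (fun z => ∃ s0 ∈ v, Relation.ReflTransGen (pvEdge conn) s0 z)
        (fun a b hab hb => by
          obtain ⟨s0, hs0, h0⟩ := hab
          exact ⟨s0, hs0, h0.tail hb⟩) conn hl v false
        (fun a ha => ⟨a, ha, Relation.ReflTransGen.refl⟩)
      obtain ⟨s0, hs0, h0⟩ := hsnd s (h1.symm ▸ hs)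
      exact ⟨s0, hs0, h0.trans hrtg⟩
    · rintro ⟨s, hs, hrtg⟩
      exact ⟨s, List.mem_append.2 (Or.inl hs), hrtg⟩
  | case2 v st hst =>
    intro x
    have hst' : ¬(pvPassB conn (v, false)).2 = true := hst
    have e2 : pvLoopB conn v = (pvPassB conn (v, false)).1 := by
      rw [pvLoopB.eq_def]
      simp only [hst']
      rfl
    obtain ⟨d, hd, hm, hc⟩ := pvPassB_shape conn conn (fun _ hp => hp) v false
    simp only [Bool.false_or] at hd
    have hdnil : d = [] := by
      have h2 : (pvPassB conn (v, false)).2 = !d.isEmpty := by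
        rw [show pvPassB conn (v, false) = (v ++ d, !d.isEmpty) from hd]
      cases d with
      | nil => rfl
      | cons a d => rw [h2] at hst'; simp at hst'
    have h1 : (pvPassB conn (v, false)).1 = v := by
      rw [show pvPassB conn (v, false) = (v ++ d, !d.isEmpty) from hd]
      simp [hdnil]
    rw [e2, h1]
    have hclv : ∀ a ∈ v, ∀ y ∈ pvTgt conn a, y ∈ v := by
      intro a ha y hy
      cases a with
      | none => simp [pvTgt] at hy
      | some c =>
        simp only [pvTgt, List.mem_map] at hy
        obtain ⟨t, ht, rfl⟩ := hy
        cases hget : (PySem.Dict.mk conn).get? c with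
        | none =>
          rw [PySem.Dict.getD_eq_get?_getD, hget] at ht
          simp at ht
        | some ts =>
          rw [PySem.Dict.getD_eq_get?_getD, hget] at ht
          simp only [Option.getD_some] at ht
          have hpc : (c, ts) ∈ conn :=
            PySem.Dict.mem_items_of_get?_eq_some (PySem.Dict.mk conn) hget
          exact hc hdnil (c, ts) hpc ((PySem.Set.contains_iff v (some c)).2 ha) t ht
    constructor
    · intro hx
      exact ⟨x, hx, Relation.ReflTransGen.refl⟩
    · rintro ⟨s, hs, hrtg⟩
      exact pvRtgMem conn v hclv hrtg hs

-- ===== VERDICT (by name: the statement is the Claim_ definition above) =====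
theorem find_reachable_steps_py_spec : Claim_equal_find_reachable_steps_py := by
  unfold Claim_equal_find_reachable_steps_py
  intro initial_steps connections_from steps transitions _hDom hPre
  obtain ⟨hnd, _⟩ := hPre
  unfold Spec_find_reachable_steps_py
  simp only [find_reachable_steps_py, find_reachable_steps_py_alt]
  set sid : PySem.Set (Option String) := PySem.Set.ofList (steps.map pvGetId) with hsid
  set q0 := initial_steps.map pvGetId with hq0
  set rA := pvAuxA sid connections_from (q0 ++ pvAllT connections_from)
      (fun x hx => List.mem_append.2 (Or.inr hx)) q0 [] []
      (fun x hx => List.mem_append.2 (Or.inl hx)) with hrA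
  set rB := PySem.Set.ofList ((pvLoopB connections_from (PySem.Set.ofList q0)).filter
      (fun n => PySem.Set.contains sid n)) with hrB
  have hmemA : ∀ x, x ∈ rA ↔
      (pvReach connections_from q0 x ∧ PySem.Set.contains sid x = true) := by
    intro x
    rw [hrA]
    exact pvAuxA_mem sid connections_from (q0 ++ pvAllT connections_from)
      (fun x hx => List.mem_append.2 (Or.inr hx)) q0 q0 [] []
      (fun x hx => List.mem_append.2 (Or.inl hx))
      (fun a ha => ⟨a, ha, Relation.ReflTransGen.refl⟩)
      (by simp) (by simp) (by simp) (fun s hs => Or.inr hs) x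
  have hmemB : ∀ x, x ∈ rB ↔
      (pvReach connections_from q0 x ∧ PySem.Set.contains sid x = true) := by
    intro x
    rw [hrB, PySem.Set.mem_ofList, List.mem_filter,
      pvLoopB_mem connections_from hnd (PySem.Set.ofList q0) x]
    constructor
    · rintro ⟨⟨s, hs, hrtg⟩, h2⟩
      exact ⟨⟨s, (PySem.Set.mem_ofList q0 s).1 hs, hrtg⟩, h2⟩
    · rintro ⟨⟨s, hs, hrtg⟩, h2⟩
      exact ⟨⟨s, (PySem.Set.mem_ofList q0 s).2 hs, hrtg⟩, h2⟩
  have hperm : rA.Perm rB := by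
    refine (List.perm_ext_iff_of_nodup ?_ ?_).2 (fun a => (hmemA a).trans (hmemB a).symm)
    · exact pvAuxA_nodup sid connections_from (q0 ++ pvAllT connections_from)
        (fun x hx => List.mem_append.2 (Or.inr hx)) q0 [] []
        (fun x hx => List.mem_append.2 (Or.inl hx)) List.nodup_nil
    · exact PySem.Set.nodup_ofList _
  exact PySem.List.sorted_eq_sorted_of_perm _ _ (fun s => s)
    (fun a b h => h) (hperm.filterMap id)
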